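-- pv_equiv track=rewrite | github.com/adithyan001/final_year_project | python/vidf.py | vadf_enc
-- ===== SOURCE A (Python) =====
-- def d2b(n,r):               #here r is no of bits
--   binary = ''
--   if n == 0:
--     while len(binary) < r:
--         binary = '0' + binary
--   while n > 0:
--     binary = str(n % 2) + binary
--     n //= 2
--   while len(binary) < r:
--     binary = '0' + binary
--
--   return binary
--
-- def vadf_enc(num):               #input must be +ve int value
--   if(num <=1):
--     return("0000000000000000")
--   else:
--     bnum = d2b(num,32)
--     for i in range(len(bnum)):
--         if bnum[i] == '1':
--             loc = 31 - i
--             break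
--     bloc = d2b(loc,5)
--     if (loc <6):
--         data_bits = bnum[-loc:]
--         while len(data_bits) < 6:
--             data_bits = '0' + data_bits
--     elif (loc ==6):
--         data_bits = bnum[32 - loc: 38 - loc]
--     else:
--         data_bits = bnum[32 - loc: 37 - loc]
--         if(bnum[38-loc]=='1'):
--            data_bits = data_bits + '1'
--         else:
--            data_bits = data_bits + bnum[37-loc]
--
--
--     count_ones = data_bits.count('1')
--     if (count_ones % 2 == 0):
--        parity_bit = '0'
--     else:
--        parity_bit = '1'
--
--     int_loc = [int(bit) for bit in bloc[::-1]]
--     error_correction_bits = [0] * 4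
--     error_correction_bits[3] = int_loc[4] ^ int_loc[2] ^ int_loc[1]
--     error_correction_bits[2] = int_loc[4] ^ int_loc[3] ^ int_loc[1]
--     error_correction_bits[1] = int_loc[4] ^ int_loc[3] ^ int_loc[2]
--     error_correction_bits[0] = int_loc[0]
--
--     temp = ''.join(map(str, error_correction_bits))
--     ecb = temp[::-1]
--
--     out16 = parity_bit + bloc + ecb + data_bits
--     return out16
-- ===== SOURCE B (Python) =====
-- def vadf_enc(num):               # input must be +ve int value
--     if num <= 1:
--         return "0000000000000000"
--     loc = num.bit_length() - 1
--     if loc <= 6: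
--         data = num & ((1 << loc) - 1)
--     else:
--         top5 = (num >> (loc - 5)) & 31
--         low = ((num >> (loc - 6)) | (num >> (loc - 7))) & 1
--         data = (top5 << 1) | low
--     parity = bin(data).count("1") & 1
--     b = [(loc >> k) & 1 for k in range(5)]
--     e = (b[4] ^ b[2] ^ b[1], b[4] ^ b[3] ^ b[1], b[4] ^ b[3] ^ b[2], b[0])
--     return f"{parity}{loc:05b}{e[0]}{e[1]}{e[2]}{e[3]}{data:06b}"
-- ===== Notes on version B (the rewrite author's own statement) =====
-- stated objective: alternative
-- what changed: Replaces the fixed-width binary-string pipeline (string built digit by digit, linear scan for the first one-digit, asymmetric slices, character counting) with direct integer bit arithmetic: the leading-bit position from the integer bit length, data bits by shift/mask/or, parity by popcount, and one fixed-width binary formatter.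
import Mathlib
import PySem

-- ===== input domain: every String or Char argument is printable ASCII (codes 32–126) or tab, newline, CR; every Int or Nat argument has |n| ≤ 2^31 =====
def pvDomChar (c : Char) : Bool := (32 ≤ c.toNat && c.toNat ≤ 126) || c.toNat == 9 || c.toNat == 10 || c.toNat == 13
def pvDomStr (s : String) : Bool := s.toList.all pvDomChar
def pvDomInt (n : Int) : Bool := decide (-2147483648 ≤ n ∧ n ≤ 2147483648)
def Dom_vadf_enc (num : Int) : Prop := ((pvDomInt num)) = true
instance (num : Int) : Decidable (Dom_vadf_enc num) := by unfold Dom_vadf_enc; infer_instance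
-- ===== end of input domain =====

-- B replaces A's 32-character binary-string pipeline (build the string digit by digit, scan it
-- for the first '1', slice substrings, count characters) by direct integer bit arithmetic
-- (bit_length, shifts, masks, popcount) plus one fixed-width binary formatter; objective:
-- alternative.


-- ===== PORT A =====
-- Strings are modelled as List Char (PySem.Chars style), with String.mk at the very end.

-- 'while len(binary) < r: binary = '0' + binary'  (the pad loop of d2b; also the data_bits
-- padding loop inside vadf_enc, which is the same loop)
def pvD2bPad (binary : List Char) (r : Int) : List Char :=
  if _h : (binary.length : Int) < r then pvD2bPad ('0' :: binary) r else binary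
termination_by (r - binary.length).toNat
decreasing_by simp; omega

-- 'while n > 0: binary = str(n % 2) + binary; n //= 2'
def pvD2bLoop (n : Int) (binary : List Char) : List Char :=
  if _h : n > 0 then
    pvD2bLoop (PySem.Int.floordiv n 2) (PySem.Int.toChars (PySem.Int.mod n 2) ++ binary)
  else binary
termination_by n.toNat
decreasing_by rw [PySem.Int.floordiv_eq_ediv_of_pos (by omega)]; omega

-- def d2b(n, r): the n == 0 pre-pad (a no-op for n != 0), the halving loop, the final pad
def pvD2b (n r : Int) : List Char :=
  pvD2bPad (pvD2bLoop n (if n = 0 then pvD2bPad [] r else [])) r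

-- 'for i in range(len(bnum)): if bnum[i] == '1': loc = 31 - i; break'
-- (for num >= 2 a '1' is always present; on the unreachable all-'0' list Python would leave
--  loc unbound and raise NameError — we return 0 there; that path is never taken on Dom)
def pvFindLoc : List Char → Int → Int
  | [], _ => 0
  | c :: rest, i => if c = '1' then 31 - i else pvFindLoc rest (i + 1)

-- the data_bits if/elif/else block
def pvDataBits (bnum : List Char) (loc : Int) : List Char :=
  if loc < 6 then
    pvD2bPad (PySem.List.slice bnum (some (-loc)) none) 6
  else if loc = 6 then
    PySem.List.slice bnum (some (32 - loc)) (some (38 - loc))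
  else
    let data_bits := PySem.List.slice bnum (some (32 - loc)) (some (37 - loc))
    if PySem.List.pyGetD bnum (38 - loc) '0' = '1' then data_bits ++ ['1']
    else data_bits ++ [PySem.List.pyGetD bnum (37 - loc) '0']

-- the int_loc / error_correction_bits / temp / ecb block ('int(bit)' and '^' act on the
-- binary digit chars '0'/'1' and the 0/1 ints they denote; exact on those values)
def pvEcb (bloc : List Char) : List Char :=
  let int_loc := bloc.reverse.map (fun c => if c = '1' then (1 : Int) else 0)
  let g := fun (k : Int) => PySem.List.pyGetD int_loc k 0
  let x := fun (a b : Int) => if a = b then (0 : Int) else 1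
  let e3 := x (x (g 4) (g 2)) (g 1)
  let e2 := x (x (g 4) (g 3)) (g 1)
  let e1 := x (x (g 4) (g 3)) (g 2)
  let e0 := g 0
  let temp := ([e0, e1, e2, e3].map PySem.Int.toChars).flatten
  temp.reverse

def vadf_enc (num : Int) : String :=
  if num ≤ 1 then "0000000000000000"
  else
    let bnum := pvD2b num 32
    let loc := pvFindLoc bnum 0
    let bloc := pvD2b loc 5
    let data_bits := pvDataBits bnum loc
    let parity_bit : Char := if (data_bits.count '1') % 2 = 0 then '0' else '1'
    String.mk (parity_bit :: (bloc ++ pvEcb bloc ++ data_bits))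

-- ===== PORT B =====
-- f'{x:0wb}' — fixed-width binary formatting; exact for 0 ≤ x < 2^w (always true on Dom here)
def fmtBin (w : Nat) (n : Nat) : List Char :=
  (List.range w).reverse.map (fun k => if n.testBit k then '1' else '0')

def vadf_enc_alt (num : Int) : String :=
  if num ≤ 1 then "0000000000000000"
  else
    let loc : Nat := PySem.Int.bitLength num - 1
    let data : Int :=
      if loc ≤ 6 then PySem.Int.band num ((1 <<< loc) - 1)
      else
        let top5 := PySem.Int.band (num >>> (loc - 5)) 31
        let low := PySem.Int.band (PySem.Int.bor (num >>> (loc - 6)) (num >>> (loc - 7))) 1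
        PySem.Int.bor (top5 <<< 1) low
    let parity : Nat := PySem.Int.bitCount data &&& 1
    let b := (List.range 5).map (fun k => (loc >>> k) &&& 1)
    let e0 := b.getD 4 0 ^^^ b.getD 2 0 ^^^ b.getD 1 0
    let e1 := b.getD 4 0 ^^^ b.getD 3 0 ^^^ b.getD 1 0
    let e2 := b.getD 4 0 ^^^ b.getD 3 0 ^^^ b.getD 2 0
    String.mk (PySem.Int.toChars (parity : Int) ++ fmtBin 5 loc ++
      PySem.Int.toChars (e0 : Int) ++ PySem.Int.toChars (e1 : Int) ++
      PySem.Int.toChars (e2 : Int) ++ PySem.Int.toChars ((b.getD 0 0 : Nat) : Int) ++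
      fmtBin 6 data.toNat)

-- ===== PRECONDITION & SPEC =====
def Spec_vadf_enc (num : Int) (out : String) : Prop := out = vadf_enc_alt num
instance (num : Int) (out : String) : Decidable (Spec_vadf_enc num out) := by unfold Spec_vadf_enc; infer_instance

-- ===== CLAIM (what is proved, stated in full; the proofs are below) =====
def Claim_equal_vadf_enc : Prop := ∀ (num : Int), Dom_vadf_enc num → Spec_vadf_enc num (vadf_enc num)

-- ===== LEMMAS AND PROOFS =====

-- MSB-first binary digits of a natural number (no leading zeros; [] for 0)
def natBits (n : Nat) : List Char :=
  if n = 0 then [] else natBits (n / 2) ++ [if n % 2 = 1 then '1' else '0']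
decreasing_by omega

theorem pad_eq (s : List Char) (r : Int) :
    pvD2bPad s r = List.replicate ((r - s.length).toNat) '0' ++ s := by
  fun_induction pvD2bPad s r with
  | case1 s h ih =>
      rw [ih]
      have hk : ((r - (('0'::s).length : Int)).toNat) + 1 = (r - s.length).toNat := by
        simp at *; omega
      rw [← hk, List.replicate_succ']
      simp
  | case2 s h =>
      have : (r - (s.length:Int)).toNat = 0 := by omega
      simp [this]

theorem loop_eq (n : Int) (acc : List Char) (h : 0 ≤ n) :
    pvD2bLoop n acc = natBits n.toNat ++ acc := by
  fun_induction pvD2bLoop n acc with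
  | case1 n acc hpos ih =>
      rw [ih (by rw [PySem.Int.floordiv_eq_ediv_of_pos (by omega)]; omega)]
      rw [PySem.Int.floordiv_eq_ediv_of_pos (by omega), PySem.Int.mod_eq_emod_of_pos (by omega)]
      have h2 : (n / 2).toNat = n.toNat / 2 := by omega
      conv_rhs => rw [natBits]
      rw [h2, if_neg (by omega), List.append_assoc]
      congr 1
      have hm : n.toNat % 2 = 0 ∨ n.toNat % 2 = 1 := by omega
      rcases hm with hm | hm
      · rw [show n % 2 = (0:Int) from by omega, if_neg (by omega)]
        rw [show PySem.Int.toChars 0 = ['0'] from by decide]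
      · rw [show n % 2 = (1:Int) from by omega, if_pos (by omega)]
        rw [show PySem.Int.toChars 1 = ['1'] from by decide]
  | case2 n acc hpos =>
      have : n.toNat = 0 := by omega
      rw [this, natBits]; simp

theorem natBits_head (n : Nat) (h : 0 < n) : ∃ t, natBits n = '1' :: t := by
  induction n using Nat.strong_induction_on with
  | _ n ih =>
    rw [natBits, if_neg (by omega)]
    by_cases h2 : n / 2 = 0
    · have h1 : n = 1 := by omega
      subst h1
      exact ⟨[], by rw [show (1:Nat)/2 = 0 from rfl, natBits]; simp⟩
    · obtain ⟨t, ht⟩ := ih (n / 2) (by omega) (by omega)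
      exact ⟨t ++ [if n % 2 = 1 then '1' else '0'], by rw [ht]; simp⟩

theorem natBits_len (n : Nat) (h : 0 < n) : (natBits n).length = Nat.log2 n + 1 := by
  induction n using Nat.strong_induction_on with
  | _ n ih =>
    rw [natBits, if_neg (by omega)]
    by_cases h2 : n / 2 = 0
    · have h1 : n = 1 := by omega
      subst h1; rw [show (1:Nat)/2 = 0 from rfl, natBits]; simp
      decide
    · have hlog : Nat.log2 n = Nat.log2 (n / 2) + 1 := by
        conv_lhs => rw [Nat.log2_def]
        rw [if_pos (by omega)]
      rw [List.length_append, ih (n / 2) (by omega) (by omega), hlog]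
      simp

@[simp] theorem fmtBin_length (w n : Nat) : (fmtBin w n).length = w := by simp [fmtBin]

theorem fmtBin_getElem (w n j : Nat) (h : j < w) :
    (fmtBin w n)[j]'(by simp [fmtBin]; omega) = (if n.testBit (w - 1 - j) then '1' else '0') := by
  simp [fmtBin, List.getElem_reverse]

theorem fmtBin_snoc (w n : Nat) :
    fmtBin (w + 1) n = fmtBin w (n / 2) ++ [if n % 2 = 1 then '1' else '0'] := by
  rw [fmtBin, List.range_succ_eq_map]
  simp [List.map_map, fmtBin, Function.comp_def, Nat.testBit_add_one, Nat.testBit_zero]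

theorem pad_natBits (w n : Nat) (h : n < 2 ^ w) :
    List.replicate (w - (natBits n).length) '0' ++ natBits n = fmtBin w n := by
  induction w generalizing n with
  | zero =>
      have : n = 0 := by omega
      subst this; simp [natBits, fmtBin]
  | succ w ih =>
      by_cases hn : n = 0
      · subst hn
        simp [natBits, fmtBin, List.map_const']
      · conv_lhs => rw [natBits, if_neg hn]
        rw [fmtBin_snoc]
        have hpow : 2 ^ (w + 1) = 2 * 2 ^ w := by ring
        have hdiv : n / 2 < 2 ^ w := by omega
        have hlen : (natBits (n / 2)).length ≤ w := by
          by_cases h2 : n / 2 = 0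
          · simp [h2, natBits]
          · rw [natBits_len _ (by omega)]
            have := (Nat.log2_lt (by omega : n / 2 ≠ 0)).mpr hdiv
            omega
        rw [List.length_append]
        simp only [List.length_cons, List.length_nil]
        have heq : w + 1 - ((natBits (n / 2)).length + (0 + 1)) = w - (natBits (n / 2)).length := by omega
        rw [heq, ← List.append_assoc, ih (n / 2) hdiv]

theorem findLoc_eq (z : Nat) (t : List Char) (i : Int) :
    pvFindLoc (List.replicate z '0' ++ '1' :: t) i = 31 - (i + z) := by
  induction z generalizing i with
  | zero => simp [pvFindLoc]
  | succ z ih =>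
      rw [List.replicate_succ, List.cons_append, pvFindLoc]
      rw [if_neg (by decide), ih]
      push_cast; ring_nf

theorem bitLength_eq_log2 (m : Nat) (h : 0 < m) :
    PySem.Int.bitLength (m : Int) = Nat.log2 m + 1 := by
  induction m using Nat.strong_induction_on with
  | _ m ih =>
    rw [PySem.Int.bitLength_natCast (by omega)]
    by_cases h2 : m / 2 = 0
    · have h1 : m = 1 := by omega
      subst h1; decide
    · rw [ih (m / 2) (by omega) (by omega)]
      have hlog : Nat.log2 m = Nat.log2 (m / 2) + 1 := by
        conv_lhs => rw [Nat.log2_def]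
        rw [if_pos (by omega)]
      omega

def dataNat (n L : Nat) : Nat :=
  if L ≤ 6 then n &&& (2 ^ L - 1)
  else ((n >>> (L - 5)) &&& 31) <<< 1 ||| (((n >>> (L - 6)) ||| (n >>> (L - 7))) &&& 1)

theorem data_eq_lt (n L : Nat) (h1 : 1 ≤ L) (hL : L < 6) :
    pvDataBits (fmtBin 32 n) (L : Int) = fmtBin 6 (dataNat n L) := by
  rw [pvDataBits, if_pos (by exact_mod_cast hL)]
  rw [PySem.List.slice_from_neg_natCast (fmtBin 32 n) L (by omega), pad_eq, fmtBin_length]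
  have hdl : (List.drop (32 - L) (fmtBin 32 n)).length = L := by simp; omega
  rw [hdl, show ((6 : Int) - (L : Nat)).toNat = 6 - L from by omega]
  apply List.ext_getElem
  · simp; omega
  · intro j hj hj'
    rw [fmtBin_length] at hj'
    rw [fmtBin_getElem 6 _ j hj']
    have hdn : dataNat n L = n &&& (2 ^ L - 1) := by
      unfold dataNat; rw [if_pos (show L ≤ 6 by omega)]
    rw [hdn]
    by_cases hjz : j < 6 - L
    · rw [List.getElem_append_left (by simp [hjz])]
      rw [List.getElem_replicate]
      have hno : ¬ (5 - j < L) := by omega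
      simp [hno]
    · rw [List.getElem_append_right (by simp; omega)]
      simp only [List.getElem_drop, List.length_replicate]
      rw [fmtBin_getElem 32 n (32 - L + (j - (6 - L))) (by omega)]
      rw [Nat.testBit_and, Nat.testBit_two_pow_sub_one]
      have h5 : 32 - 1 - (32 - L + (j - (6 - L))) = 6 - 1 - j := by omega
      have h6 : 6 - 1 - j < L := by omega
      simp [h5, h6]

theorem data_eq_eq (n : Nat) :
    pvDataBits (fmtBin 32 n) ((6 : Nat) : Int) = fmtBin 6 (dataNat n 6) := by
  rw [pvDataBits, if_neg (by norm_num), if_pos (by norm_num)]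
  rw [show (32 : Int) - ((6:Nat):Int) = ((26:Nat):Int) from by norm_num,
      show (38 : Int) - ((6:Nat):Int) = ((32:Nat):Int) from by norm_num]
  rw [PySem.List.slice_natCast]
  have hdn : dataNat n 6 = n &&& (2 ^ 6 - 1) := by unfold dataNat; rw [if_pos (by omega)]
  rw [hdn]
  apply List.ext_getElem
  · simp
  · intro j hj hj'
    rw [fmtBin_length] at hj'
    rw [fmtBin_getElem 6 _ j hj']
    simp only [List.getElem_take, List.getElem_drop]
    rw [fmtBin_getElem 32 n (26 + j) (by omega)]
    have h5 : 32 - 1 - (26 + j) = 6 - 1 - j := by omega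
    have h63 : Nat.testBit 63 (5 - j) = true := by
      rw [show (63 : Nat) = 2 ^ 6 - 1 from rfl, Nat.testBit_two_pow_sub_one]
      simp
      omega
    simp [h5, h63]

theorem data_eq_gt (n L : Nat) (hL : 6 < L) (h31 : L ≤ 31) :
    pvDataBits (fmtBin 32 n) (L : Int) = fmtBin 6 (dataNat n L) := by
  have hgoal : ∀ c : Char,
      ((n.testBit (L - 7) = true ∧ c = '1') ∨
        (n.testBit (L - 7) = false ∧ c = (if n.testBit (L - 6) then '1' else '0'))) →
      List.take 5 (List.drop (32 - L) (fmtBin 32 n)) ++ [c] = fmtBin 6 (dataNat n L) := by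
    intro c hc
    have hdn : dataNat n L =
        ((n >>> (L - 5)) &&& 31) <<< 1 ||| (((n >>> (L - 6)) ||| (n >>> (L - 7))) &&& 1) := by
      unfold dataNat; rw [if_neg (by omega)]
    rw [hdn]
    apply List.ext_getElem
    · simp; omega
    · intro j hj hj'
      rw [fmtBin_length] at hj'
      rw [fmtBin_getElem 6 _ j hj']
      by_cases hj5 : j < 5
      · rw [List.getElem_append_left (by simp; omega)]
        simp only [List.getElem_take, List.getElem_drop]
        rw [fmtBin_getElem 32 n (32 - L + j) (by omega)]
        rw [Nat.testBit_or]
        have t1 : ((((n >>> (L - 6)) ||| (n >>> (L - 7))) &&& 1).testBit (6 - 1 - j)) = false := by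
          apply Nat.testBit_lt_two_pow
          calc ((n >>> (L - 6)) ||| (n >>> (L - 7))) &&& 1 ≤ 1 := Nat.and_le_right
            _ < 2 ^ (6 - 1 - j) := by
                have : (2:Nat) ^ 1 ≤ 2 ^ (6 - 1 - j) := Nat.pow_le_pow_right (by omega) (by omega)
                omega
        rw [t1, Bool.or_false]
        rw [Nat.testBit_shiftLeft, Nat.testBit_and, Nat.testBit_shiftRight]
        have t31 : Nat.testBit 31 (6 - 1 - j - 1) = true := by
          rw [show (31:Nat) = 2 ^ 5 - 1 from rfl, Nat.testBit_two_pow_sub_one]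
          exact decide_eq_true (by omega)
        rw [t31, Bool.and_true]
        rw [show L - 5 + (6 - 1 - j - 1) = 32 - 1 - (32 - L + j) from by omega]
        simp [show (1:Nat) ≤ 6 - 1 - j from by omega]
      · have hj5' : j = 5 := by omega
        subst hj5'
        rw [List.getElem_append_right (by simp)]
        have hlt : (List.take 5 (List.drop (32 - L) (fmtBin 32 n))).length = 5 := by simp; omega
        simp only [hlt, Nat.sub_self, List.getElem_cons_zero]
        rw [Nat.testBit_or]
        have s1 : (((n >>> (L - 5)) &&& 31) <<< 1).testBit (6 - 1 - 5) = false := by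
          rw [Nat.testBit_shiftLeft]
          simp
        rw [s1, Bool.false_or]
        rw [Nat.testBit_and, Nat.testBit_or, Nat.testBit_shiftRight, Nat.testBit_shiftRight]
        rw [show Nat.testBit 1 (6 - 1 - 5) = true from rfl, Bool.and_true]
        rw [show L - 6 + (6 - 1 - 5) = L - 6 from by omega,
            show L - 7 + (6 - 1 - 5) = L - 7 from by omega]
        rcases hc with ⟨hb7, hc⟩ | ⟨hb7, hc⟩
        · subst hc
          simp [hb7]
        · subst hc
          by_cases b6 : n.testBit (L - 6) <;> simp [hb7, b6]
  rw [pvDataBits, if_neg (by exact_mod_cast (by omega : ¬ ((L:Int) < 6))),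
      if_neg (by exact_mod_cast (by omega : ¬ ((L:Int) = 6)))]
  rw [show (32 : Int) - (L : Nat) = ((32 - L : Nat) : Int) from by omega,
      show (37 : Int) - (L : Nat) = ((37 - L : Nat) : Int) from by omega,
      show (38 : Int) - (L : Nat) = ((38 - L : Nat) : Int) from by omega]
  rw [PySem.List.slice_natCast]
  rw [PySem.List.pyGetD_natCast, PySem.List.pyGetD_natCast]
  rw [List.getD_eq_getElem _ _ (by simp; omega), List.getD_eq_getElem _ _ (by simp; omega)]
  rw [fmtBin_getElem 32 n (38 - L) (by omega), fmtBin_getElem 32 n (37 - L) (by omega)]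
  have htk : (37 - L) - (32 - L) = 5 := by omega
  rw [htk]
  have e7 : 32 - 1 - (38 - L) = L - 7 := by omega
  have e8 : 32 - 1 - (37 - L) = L - 6 := by omega
  rw [e7, e8]
  by_cases b7 : n.testBit (L - 7)
  · rw [if_pos (by rw [if_pos b7])]
    exact hgoal '1' (Or.inl ⟨by simp [b7], rfl⟩)
  · rw [if_neg (by rw [if_neg b7]; decide)]
    exact hgoal _ (Or.inr ⟨by simp [b7], rfl⟩)

set_option maxRecDepth 8192 in
set_option maxHeartbeats 2000000 in
theorem asm : ∀ L < 32, ∀ d < 64,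
    String.mk ((if (fmtBin 6 d).count '1' % 2 = 0 then '0' else '1') ::
        (fmtBin 5 L ++ pvEcb (fmtBin 5 L) ++ fmtBin 6 d)) =
      (let b := (List.range 5).map (fun k => (L >>> k) &&& 1)
       let e0 := b.getD 4 0 ^^^ b.getD 2 0 ^^^ b.getD 1 0
       let e1 := b.getD 4 0 ^^^ b.getD 3 0 ^^^ b.getD 1 0
       let e2 := b.getD 4 0 ^^^ b.getD 3 0 ^^^ b.getD 2 0
       String.mk (PySem.Int.toChars ((PySem.Int.bitCount (d : Int) &&& 1 : Nat) : Int) ++ fmtBin 5 L ++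
         PySem.Int.toChars (e0 : Int) ++ PySem.Int.toChars (e1 : Int) ++
         PySem.Int.toChars (e2 : Int) ++ PySem.Int.toChars ((b.getD 0 0 : Nat) : Int) ++
         fmtBin 6 d)) := by
  decide

theorem vadf_enc_main (num : Int) (hdom : num ≤ 2147483648) :
    vadf_enc num = vadf_enc_alt num := by
  by_cases hle : num ≤ 1
  · rw [vadf_enc, vadf_enc_alt, if_pos hle, if_pos hle]
  · have hn2 : 2 ≤ num.toNat := by omega
    set n := num.toNat with hn
    have hnum : num = (n : Int) := by omega
    have hn31 : n ≤ 2 ^ 31 := by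
      have : (2:Nat) ^ 31 = 2147483648 := by norm_num
      omega
    set L := Nat.log2 n with hLdef
    have hLpow : 2 ^ L ≤ n := Nat.log2_self_le (by omega)
    have hLpow2 : n < 2 ^ (L + 1) := Nat.lt_log2_self
    have hL1 : 1 ≤ L := by
      rcases Nat.eq_zero_or_pos L with h | h
      · rw [h] at hLpow2; norm_num at hLpow2; omega
      · exact h
    have hL31 : L ≤ 31 := by
      by_contra hcon
      have h1 : (2:Nat) ^ 32 ≤ 2 ^ L := Nat.pow_le_pow_right (by norm_num) (by omega)
      have h2 : (2:Nat) ^ 31 < 2 ^ 32 := by norm_num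
      omega
    have hlen : (natBits n).length = L + 1 := natBits_len n (by omega)
    have hn32 : n < 2 ^ 32 := by
      have : (2:Nat) ^ 31 < 2 ^ 32 := by norm_num
      omega
    -- A side: bnum
    have hbnum : pvD2b num 32 = fmtBin 32 n := by
      rw [pvD2b, if_neg (by omega), loop_eq num [] (by omega), List.append_nil, pad_eq]
      rw [show ((32:Int) - ((natBits n).length : Int)).toNat = 32 - (natBits n).length from by
        rw [hlen]; omega]
      exact pad_natBits 32 n hn32
    have hfmt_repr : fmtBin 32 n = List.replicate (32 - (L + 1)) '0' ++ natBits n := by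
      rw [← pad_natBits 32 n hn32, hlen]
    have hloc : pvFindLoc (fmtBin 32 n) 0 = (L : Int) := by
      obtain ⟨t, ht⟩ := natBits_head n (by omega)
      rw [hfmt_repr, ht, findLoc_eq]
      push_cast
      omega
    -- A side: bloc
    have hbloc : pvD2b ((L : Nat) : Int) 5 = fmtBin 5 L := by
      rw [pvD2b, if_neg (by exact_mod_cast (by omega : ¬ (L = 0))), loop_eq _ _ (by omega),
          List.append_nil, pad_eq, Int.toNat_natCast]
      have hlog5 : Nat.log2 L < 5 := (Nat.log2_lt (by omega)).mpr (by omega)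
      rw [show ((5:Int) - ((natBits L).length : Int)).toNat = 5 - (natBits L).length from by
        rw [natBits_len L (by omega)]; omega]
      exact pad_natBits 5 L (by omega)
    -- A side: data_bits
    have hdata : pvDataBits (fmtBin 32 n) ((L : Nat) : Int) = fmtBin 6 (dataNat n L) := by
      rcases lt_trichotomy L 6 with h | h | h
      · exact data_eq_lt n L hL1 h
      · rw [h]; exact data_eq_eq n
      · exact data_eq_gt n L h hL31
    -- data bound
    have hd64 : dataNat n L < 64 := by
      unfold dataNat
      split_ifs with h6
      · have h1 : n &&& (2 ^ L - 1) ≤ 2 ^ L - 1 := Nat.and_le_right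
        have h2 : (2:Nat) ^ L ≤ 2 ^ 6 := Nat.pow_le_pow_right (by norm_num) h6
        norm_num at h2 ⊢
        omega
      · have h1 : (n >>> (L - 5)) &&& 31 ≤ 31 := Nat.and_le_right
        have h2 : ((n >>> (L - 5)) &&& 31) <<< 1 ≤ 62 := by
          rw [Nat.shiftLeft_eq]; omega
        have h3 : ((n >>> (L - 6)) ||| (n >>> (L - 7))) &&& 1 ≤ 1 := Nat.and_le_right
        have h4 : ((n >>> (L - 5)) &&& 31) <<< 1 < 2 ^ 6 := by norm_num; omega
        have h5 : ((n >>> (L - 6)) ||| (n >>> (L - 7))) &&& 1 < 2 ^ 6 := by norm_num; omega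
        have := Nat.or_lt_two_pow h4 h5
        norm_num at this ⊢
        omega
    -- B side: loc
    have hbl : PySem.Int.bitLength num - 1 = L := by
      rw [hnum, bitLength_eq_log2 n (by omega)]
      omega
    -- B side: data
    have hdataB : (if L ≤ 6 then PySem.Int.band num ((1 <<< L) - 1)
        else PySem.Int.bor ((PySem.Int.band (num >>> (L - 5)) 31) <<< 1)
          (PySem.Int.band (PySem.Int.bor (num >>> (L - 6)) (num >>> (L - 7))) 1)) =
        ((dataNat n L : Nat) : Int) := by
      unfold dataNat
      split_ifs with h6
      · rw [hnum]
        rw [show ((((1 <<< L : Nat)) : Int) - 1) = (((2 ^ L - 1 : Nat)) : Int) from by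
          have h2 : (1:Nat) ≤ 2 ^ L := Nat.one_le_two_pow
          rw [Nat.shiftLeft_eq, Nat.cast_sub h2]
          push_cast; ring]
        rw [PySem.Int.band_natCast]
      · rw [hnum]
        rw [show ((n : Int) >>> (L - 5)) = ((n >>> (L - 5) : Nat) : Int) from by exact_mod_cast rfl,
            show ((n : Int) >>> (L - 6)) = ((n >>> (L - 6) : Nat) : Int) from by exact_mod_cast rfl,
            show ((n : Int) >>> (L - 7)) = ((n >>> (L - 7) : Nat) : Int) from by exact_mod_cast rfl]
        rw [show (31 : Int) = ((31 : Nat) : Int) from rfl, PySem.Int.band_natCast]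
        rw [show ((((n >>> (L - 5) &&& 31 : Nat)) : Int) <<< 1) =
            (((n >>> (L - 5) &&& 31) <<< 1 : Nat) : Int) from by push_cast; rfl]
        rw [PySem.Int.bor_natCast]
        rw [show (1 : Int) = ((1 : Nat) : Int) from rfl, PySem.Int.band_natCast,
            PySem.Int.bor_natCast]
    -- assemble
    rw [vadf_enc, vadf_enc_alt, if_neg hle, if_neg hle]
    simp only [hbnum, hloc, hbloc, hdata, hbl, hdataB, Int.toNat_natCast]
    exact asm L (by omega) (dataNat n L) hd64

-- ===== VERDICT (by name: the statement is the Claim_ definition above) =====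
theorem vadf_enc_spec : Claim_equal_vadf_enc := by
  intro num hdom
  have h : -2147483648 ≤ num ∧ num ≤ 2147483648 := by
    unfold Dom_vadf_enc pvDomInt at hdom
    exact of_decide_eq_true hdom
  unfold Spec_vadf_enc
  exact vadf_enc_main num h.2
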